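-- pv_equiv track=rewrite | github.com/shanexu/leetcode-rust | src/bin/test.py | board_strs_to_board
-- ===== SOURCE A (Python) =====
-- def board_strs_to_board(strs):
--     board = []
--     for s in strs:
--         s = s.replace(" ", "")
--         s = s.replace("_", ".")
--         s = s.replace("*", ".")
--         board.append([s[i : i + 1] for i in range(len(s))])
--     return board
-- ===== SOURCE B (Python) =====
-- def board_strs_to_board(strs):
--     board = []
--     for s in strs:
--         row = []
--         for ch in s:
--             if ch == " ":
--                 continue
--             if ch == "_" or ch == "*":
--                 row.append(".")
--             else:
--                 row.append(ch)
--         board.append(row)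
--     return board
-- ===== Notes on version B (the rewrite author's own statement) =====
-- stated objective: simpler
-- what changed: Replaces the three whole-string replace passes plus an index-based slicing comprehension with a single character-level traversal per string that skips spaces and maps '_'/'*' to '.' while building each row incrementally.
import Mathlib
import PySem

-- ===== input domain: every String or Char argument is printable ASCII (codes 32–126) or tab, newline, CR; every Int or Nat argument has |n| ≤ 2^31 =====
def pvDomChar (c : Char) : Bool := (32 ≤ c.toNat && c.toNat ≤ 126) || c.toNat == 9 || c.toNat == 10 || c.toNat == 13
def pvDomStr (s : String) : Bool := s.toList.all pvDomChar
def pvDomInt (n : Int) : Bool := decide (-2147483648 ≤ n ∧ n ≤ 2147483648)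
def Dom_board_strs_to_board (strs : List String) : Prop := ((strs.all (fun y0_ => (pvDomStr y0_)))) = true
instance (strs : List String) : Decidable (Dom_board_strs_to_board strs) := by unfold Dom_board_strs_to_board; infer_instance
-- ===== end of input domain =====

-- B fuses A's three replace passes and slicing comprehension into one character-level pass per string (objective: simpler).

-- ===== PORT A =====
def board_strs_to_board (strs : List String) : List (List String) :=
  strs.foldl (fun board s =>
    let s1 := PySem.Str.replace s " " ""
    let s2 := PySem.Str.replace s1 "_" "."
    let s3 := PySem.Str.replace s2 "*" "."
    board ++ [(PySem.List.pyRange 0 (PySem.Str.len s3) 1).map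
      (fun i => PySem.Str.slice s3 (some i) (some (i + 1)))]) []

-- ===== PORT B =====
def pvRowOf (s : String) : List String :=
  s.toList.foldl (fun row ch =>
    if ch = ' ' then row
    else if ch = '_' ∨ ch = '*' then row ++ ["."]
    else row ++ [String.ofList [ch]]) []

def board_strs_to_board_alt (strs : List String) : List (List String) :=
  strs.foldl (fun board s => board ++ [pvRowOf s]) []

-- ===== PRECONDITION & SPEC =====
def Spec_board_strs_to_board (strs : List String) (out : List (List String)) : Prop := out = board_strs_to_board_alt strs
instance (strs : List String) (out : List (List String)) : Decidable (Spec_board_strs_to_board strs out) := by unfold Spec_board_strs_to_board; infer_instance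

-- ===== CLAIM (what is proved, stated in full; the proofs are below) =====
def Claim_equal_board_strs_to_board : Prop := ∀ (strs : List String), Dom_board_strs_to_board strs → Spec_board_strs_to_board strs (board_strs_to_board strs)

-- ===== LEMMAS AND PROOFS =====

-- replace with a single-char pattern is a flatMap over the characters
theorem pv_replace_go_single (a : Char) (new : List Char) :
    ∀ (fuel : Nat) (l acc : List Char), l.length ≤ fuel →
      PySem.Chars.replace.go [a] new fuel l acc
        = acc.reverse ++ l.flatMap (fun c => if c = a then new else [c]) := by
  intro fuel
  induction fuel with
  | zero =>
    intro l acc h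
    match l with
    | [] => simp [PySem.Chars.replace.go]
    | c :: t => simp at h
  | succ n ih =>
    intro l acc h
    match l with
    | [] => simp [PySem.Chars.replace.go]
    | c :: t =>
      simp only [PySem.Chars.replace.go]
      simp only [List.length_cons] at h
      by_cases hca : c = a
      · subst hca
        have hpre : List.isPrefixOf [c] (c :: t) = true := by
          simp [List.isPrefixOf]
        rw [if_pos hpre]
        simp only [List.length_singleton, List.drop_succ_cons, List.drop_zero]
        rw [ih _ _ (by omega)]
        simp
      · have hpre : List.isPrefixOf [a] (c :: t) = false := by
          simp [List.isPrefixOf]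
          intro hac; exact absurd hac.symm hca
        rw [if_neg (by simp [hpre])]
        rw [ih _ _ (by omega)]
        simp [hca]

theorem pv_replace_single (cs : List Char) (a : Char) (new : List Char) :
    PySem.Chars.replace cs [a] new = cs.flatMap (fun c => if c = a then new else [c]) := by
  rw [PySem.Chars.replace]
  simp only [List.isEmpty_cons, if_false, Bool.false_eq_true]
  rw [pv_replace_go_single a new cs.length cs [] le_rfl]
  simp

theorem pv_flatMap_space (cs : List Char) :
    cs.flatMap (fun c => if c = ' ' then ([] : List Char) else [c])
      = cs.filter (fun c => c ≠ ' ') := by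
  induction cs with
  | nil => rfl
  | cons c t ih => by_cases hc : c = ' ' <;> simp [hc, ih]

theorem pv_flatMap_map (cs : List Char) (a b : Char) :
    cs.flatMap (fun c => if c = a then [b] else [c])
      = cs.map (fun c => if c = a then b else c) := by
  induction cs with
  | nil => rfl
  | cons c t ih => by_cases hc : c = a <;> simp [hc, ih]

-- the slicing comprehension is the list of singleton strings
theorem pv_slices_eq (s : String) :
    (PySem.List.pyRange 0 (PySem.Str.len s) 1).map
        (fun i => PySem.Str.slice s (some i) (some (i + 1)))
      = s.toList.map (fun c => String.ofList [c]) := by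
  apply List.ext_getElem
  · simp [PySem.Str.len, PySem.List.length_pyRange_one]
  · intro k h1 h2
    simp only [List.getElem_map]
    have hk : k < s.toList.length := by simpa using h2
    rw [PySem.List.getElem_pyRange_one]
    apply String.toList_inj.mp
    rw [PySem.Str.toList_slice, PySem.Chars.slice_eq_listSlice, String.toList_ofList]
    rw [show ((0 : Int) + (k : Int)) = ((k : Nat) : Int) by omega]
    rw [show ((k : Int) + 1) = ((k + 1 : Nat) : Int) by omega]
    rw [PySem.List.slice_natCast]
    simp [List.take_one_drop_eq_of_lt_length hk]

-- B's inner fold accumulates filter-then-map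
theorem pv_fold_row :
    ∀ (cs : List Char) (acc : List String),
      cs.foldl (fun row ch =>
        if ch = ' ' then row
        else if ch = '_' ∨ ch = '*' then row ++ ["."]
        else row ++ [String.ofList [ch]]) acc
      = acc ++ (cs.filter (fun c => c ≠ ' ')).map
          (fun c => if c = '_' ∨ c = '*' then "." else String.ofList [c]) := by
  intro cs
  induction cs with
  | nil => simp
  | cons c t ih =>
    intro acc
    by_cases hc : c = ' '
    · subst hc; simp [ih]
    · by_cases hd : c = '_' ∨ c = '*'
      · simp [List.foldl_cons, hc, hd, ih]
      · simp [List.foldl_cons, hc, hd, ih]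

-- per-string agreement of the two row computations
theorem pv_row_eq (s : String) :
    (PySem.List.pyRange 0
        (PySem.Str.len (PySem.Str.replace (PySem.Str.replace (PySem.Str.replace s " " "") "_" ".") "*" ".")) 1).map
      (fun i => PySem.Str.slice
        (PySem.Str.replace (PySem.Str.replace (PySem.Str.replace s " " "") "_" ".") "*" ".")
        (some i) (some (i + 1)))
    = pvRowOf s := by
  rw [pv_slices_eq]
  have h3 : (PySem.Str.replace (PySem.Str.replace (PySem.Str.replace s " " "") "_" ".") "*" ".").toList
      = ((s.toList.filter (fun c => c ≠ ' ')).map (fun c => if c = '_' then '.' else c)).map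
          (fun c => if c = '*' then '.' else c) := by
    simp only [PySem.Str.toList_replace]
    have e1 : (" " : String).toList = [' '] := rfl
    have e2 : ("" : String).toList = [] := rfl
    have e3 : ("_" : String).toList = ['_'] := rfl
    have e4 : ("." : String).toList = ['.'] := rfl
    have e5 : ("*" : String).toList = ['*'] := rfl
    rw [e1, e2, e3, e4, e5]
    rw [pv_replace_single, pv_replace_single, pv_replace_single]
    rw [pv_flatMap_space, pv_flatMap_map, pv_flatMap_map]
  rw [h3]
  unfold pvRowOf
  rw [pv_fold_row s.toList []]
  rw [List.map_map, List.map_map]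
  apply List.map_congr_left
  intro c _
  by_cases h1 : c = '_'
  · subst h1; simp
  · by_cases h2 : c = '*'
    · subst h2; simp
    · simp [h1, h2, Function.comp]

theorem pv_fold_eq : ∀ (l : List String) (acc : List (List String)),
    l.foldl (fun board s =>
      let s1 := PySem.Str.replace s " " ""
      let s2 := PySem.Str.replace s1 "_" "."
      let s3 := PySem.Str.replace s2 "*" "."
      board ++ [(PySem.List.pyRange 0 (PySem.Str.len s3) 1).map
        (fun i => PySem.Str.slice s3 (some i) (some (i + 1)))]) acc
    = l.foldl (fun board s => board ++ [pvRowOf s]) acc := by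
  intro l
  induction l with
  | nil => intro acc; simp only [List.foldl_nil]
  | cons s t ih =>
    intro acc
    simp only [List.foldl_cons]
    rw [ih]
    have h : (let s1 := PySem.Str.replace s " " ""
      let s2 := PySem.Str.replace s1 "_" "."
      let s3 := PySem.Str.replace s2 "*" "."
      acc ++ [(PySem.List.pyRange 0 (PySem.Str.len s3) 1).map
        (fun i => PySem.Str.slice s3 (some i) (some (i + 1)))]) = acc ++ [pvRowOf s] := by
      simp only [pv_row_eq]
    rw [h]

theorem pv_main : ∀ (strs : List String), board_strs_to_board strs = board_strs_to_board_alt strs := by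
  intro strs
  unfold board_strs_to_board board_strs_to_board_alt
  exact pv_fold_eq strs []

-- ===== VERDICT (by name: the statement is the Claim_ definition above) =====
theorem board_strs_to_board_spec : Claim_equal_board_strs_to_board := by
  intro strs _
  unfold Spec_board_strs_to_board
  exact pv_main strs
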